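-- pv_equiv track=rewrite | github.com/Sattusss/HackerRank-Practice | Palindrome_Index.py | calc_pal
-- ===== SOURCE A (Python) =====
-- def calc_pal(line):
--
--     list = [x for x in line]
--
--     orig = list[:]
--     rev = list[:]
--     rev.reverse()
--
--     if orig == rev:
--             return -1
--
--     for i in range(len(orig)):
--         if not orig[i] == rev[i]:
--             cpy = orig[:]
--             del cpy[i]
--             cpyRev = rev[:]
--             del cpyRev[len(orig) - i - 1]
--             if cpy == cpyRev:
--                 return i
--             else:
--                 return len(orig) - i - 1
-- ===== SOURCE B (Python) =====
-- def calc_pal(line):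
--     n = len(line)
--     k = 0
--     # sweep inward from the left until the outer pairs stop matching
--     while 2 * k < n - 1 and line[k] == line[n - 1 - k]:
--         k += 1
--     if 2 * k >= n - 1:
--         return -1          # the sweep converged: already a palindrome
--     j = k
--     # continue the same sweep, shifted by one on the left, to test whether
--     # deleting line[j] leaves a palindrome (pairs (k+1, n-1-k))
--     while 2 * k < n - 2 and line[k + 1] == line[n - 1 - k]:
--         k += 1
--     return j if 2 * k >= n - 2 else n - 1 - j
-- ===== Notes on version B (the rewrite author's own statement) =====
-- stated objective: alternative
-- what changed: B never materializes a list, a reversed copy or any deleted copies: a single index sweep over the string finds the first mismatching outer pair (already-palindrome falls out when the sweep converges), then the SAME sweep continues with the left index shifted by one to test whether deleting that character leaves a palindrome.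
import Mathlib
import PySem

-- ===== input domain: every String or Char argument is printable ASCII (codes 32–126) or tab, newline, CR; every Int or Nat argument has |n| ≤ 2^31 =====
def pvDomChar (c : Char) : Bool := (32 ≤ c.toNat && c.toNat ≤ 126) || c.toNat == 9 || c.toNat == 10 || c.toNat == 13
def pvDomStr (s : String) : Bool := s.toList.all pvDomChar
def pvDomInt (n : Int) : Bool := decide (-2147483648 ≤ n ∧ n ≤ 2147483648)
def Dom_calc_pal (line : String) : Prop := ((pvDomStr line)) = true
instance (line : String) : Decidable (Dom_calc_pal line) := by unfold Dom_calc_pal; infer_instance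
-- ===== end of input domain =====

-- B drops A's list/reversed-copy/delete-and-compare machinery for a single index sweep over the
-- string whose continuation (left index shifted by one) tests the delete-left candidate
-- (objective: alternative).

-- ===== PORT A =====
-- the 'for i in range(len(orig))' loop with early returns; indices are always in range there, so getD is exact;
-- the loop falls through (Python: None) only when orig = rev, which calc_pal never reaches — modeled as none
def pvA_loop (orig rev : List Char) (i : Nat) : Option Int :=
  if _h : i < orig.length then
    if ¬ (orig.getD i ' ' = rev.getD i ' ') then
      let cpy := orig.eraseIdx i
      let cpyRev := rev.eraseIdx (orig.length - i - 1)
      if cpy = cpyRev then some (i : Int) else some ((orig.length : Int) - (i : Int) - 1)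
    else pvA_loop orig rev (i + 1)
  else none
termination_by orig.length - i

def calc_pal (line : String) : Int :=
  let lst := line.toList
  let orig := lst
  let rev := lst.reverse
  if orig = rev then -1
  else (pvA_loop orig rev 0).getD 0   -- fall-through unreachable here

-- ===== PORT B =====
-- Source B's first while loop: 'while 2*k < n-1 and line[k] == line[n-1-k]: k += 1';
-- over Nat, '2*k+1 < n' is Python's integer condition '2*k < n-1' (exact for all n ≥ 0).
def pvB_find (s : List Char) (n k : Nat) : Nat :=
  if 2 * k + 1 < n ∧ s.getD k ' ' = s.getD (n - 1 - k) ' ' then pvB_find s n (k + 1)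
  else k
termination_by n - k

-- Source B's second while loop: 'while 2*k < n-2 and line[k+1] == line[n-1-k]: k += 1';
-- '2*k+2 < n' is Python's '2*k < n-2'.
def pvB_ver (s : List Char) (n k : Nat) : Nat :=
  if 2 * k + 2 < n ∧ s.getD (k + 1) ' ' = s.getD (n - 1 - k) ' ' then pvB_ver s n (k + 1)
  else k
termination_by n - k

def calc_pal_alt (line : String) : Int :=
  let s := line.toList
  let n := s.length
  let k := pvB_find s n 0
  if n ≤ 2 * k + 1 then -1                -- Python's '2*k >= n-1'
  else
    let j := k
    let k2 := pvB_ver s n k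
    if n ≤ 2 * k2 + 2 then (j : Int)      -- Python's '2*k >= n-2'
    else (n : Int) - 1 - (j : Int)

-- ===== PRECONDITION & SPEC =====
def Spec_calc_pal (line : String) (out : Int) : Prop := out = calc_pal_alt line
instance (line : String) (out : Int) : Decidable (Spec_calc_pal line out) := by unfold Spec_calc_pal; infer_instance

-- ===== CLAIM (what is proved, stated in full; the proofs are below) =====
def Claim_equal_calc_pal : Prop := ∀ (line : String), Dom_calc_pal line → Spec_calc_pal line (calc_pal line)

-- ===== LEMMAS AND PROOFS =====

theorem pv_getElem_idx (s : List Char) (x y : Nat) (hx : x < s.length) (hy : y < s.length)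
    (h : x = y) : s[x] = s[y] := by subst h; rfl

theorem pv_getD_rev (s : List Char) (i : Nat) (h : i < s.length) :
    s.reverse.getD i ' ' = s.getD (s.length - 1 - i) ' ' := by
  rw [List.getD_eq_getElem _ _ (by simpa using h), List.getD_eq_getElem _ _ (by omega),
    List.getElem_reverse]

theorem pv_pal_iff (s : List Char) :
    s = s.reverse ↔ ∀ i, i < s.length → s.getD i ' ' = s.getD (s.length - 1 - i) ' ' := by
  constructor
  · intro h i hi
    conv_lhs => rw [h]
    exact pv_getD_rev s i hi
  · intro h
    refine List.ext_getElem (by simp) ?_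
    intro i h1 h2
    rw [List.getElem_reverse]
    have := h i h1
    rwa [List.getD_eq_getElem _ _ h1, List.getD_eq_getElem _ _ (by omega)] at this

-- find loop, palindrome case: the sweep converges
theorem pv_find_conv (s : List Char) (n : Nat) (hn : n = s.length)
    (hpal : ∀ i, i < n → s.getD i ' ' = s.getD (n - 1 - i) ' ') :
    ∀ d k, n - k = d → n ≤ 2 * (pvB_find s n k) + 1 := by
  intro d
  induction d using Nat.strong_induction_on with
  | _ d ih =>
    intro k hd
    rw [pvB_find]
    split_ifs with h
    · exact ih (n - (k + 1)) (by omega) (k + 1) rfl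
    · by_contra hc
      push_neg at hc
      exact h ⟨by omega, hpal k (by omega)⟩

-- find loop, mismatch case: stops exactly at the first mismatch j
theorem pv_find_stop (s : List Char) (n j : Nat) (hjj : 2 * j + 1 < n)
    (hmm : ¬ s.getD j ' ' = s.getD (n - 1 - j) ' ')
    (hpre : ∀ i, i < j → s.getD i ' ' = s.getD (n - 1 - i) ' ') :
    ∀ d k, j - k = d → k ≤ j → pvB_find s n k = j := by
  intro d
  induction d using Nat.strong_induction_on with
  | _ d ih =>
    intro k hd hk
    rw [pvB_find]
    split_ifs with h
    · rcases Nat.lt_or_ge k j with hlt | hge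
      · exact ih (j - (k + 1)) (by omega) (k + 1) rfl (by omega)
      · have hkj : k = j := by omega
        subst hkj
        exact absurd h.2 hmm
    · rcases Nat.lt_or_ge k j with hlt | hge
      · exact absurd ⟨by omega, hpre k hlt⟩ h
      · omega

-- ver loop, all shifted pairs match: the sweep converges
theorem pv_ver_conv (s : List Char) (n j : Nat)
    (hok : ∀ k, j ≤ k → 2 * k + 2 < n → s.getD (k + 1) ' ' = s.getD (n - 1 - k) ' ') :
    ∀ d k, n - k = d → j ≤ k → n ≤ 2 * (pvB_ver s n k) + 2 := by
  intro d
  induction d using Nat.strong_induction_on with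
  | _ d ih =>
    intro k hd hjk
    rw [pvB_ver]
    split_ifs with h
    · exact ih (n - (k + 1)) (by omega) (k + 1) rfl (by omega)
    · by_contra hc
      push_neg at hc
      exact h ⟨by omega, hok k hjk (by omega)⟩

-- ver loop, some shifted pair fails: stops at the first failing k0, before convergence
theorem pv_ver_stop (s : List Char) (n j k0 : Nat) (hk0 : 2 * k0 + 2 < n)
    (hmm : ¬ s.getD (k0 + 1) ' ' = s.getD (n - 1 - k0) ' ')
    (hpre : ∀ i, j ≤ i → i < k0 → 2 * i + 2 < n → s.getD (i + 1) ' ' = s.getD (n - 1 - i) ' ') :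
    ∀ d k, k0 - k = d → j ≤ k → k ≤ k0 → pvB_ver s n k = k0 := by
  intro d
  induction d using Nat.strong_induction_on with
  | _ d ih =>
    intro k hd hjk hk
    rw [pvB_ver]
    split_ifs with h
    · rcases Nat.lt_or_ge k k0 with hlt | hge
      · exact ih (k0 - (k + 1)) (by omega) (k + 1) rfl (by omega) (by omega)
      · have hkk : k = k0 := by omega
        subst hkk
        exact absurd h.2 hmm
    · rcases Nat.lt_or_ge k k0 with hlt | hge
      · exact absurd ⟨by omega, hpre k hjk hlt (by omega)⟩ h
      · omega

-- A-side loop: reaches the first mismatch j and returns the delete-and-compare verdict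
theorem pv_aloop (s : List Char) (j : Nat) (hj : j < s.length)
    (hmm : ¬ s.getD j ' ' = s.getD (s.length - 1 - j) ' ')
    (hpre : ∀ i, i < j → s.getD i ' ' = s.getD (s.length - 1 - i) ' ') :
    ∀ d i0, i0 ≤ j → j - i0 = d → pvA_loop s s.reverse i0 =
      some (if s.eraseIdx j = s.reverse.eraseIdx (s.length - j - 1) then (j : Int)
            else (s.length : Int) - (j : Int) - 1) := by
  intro d
  induction d with
  | zero =>
    intro i0 h1 h2
    have : i0 = j := by omega
    subst this
    rw [pvA_loop]
    rw [dif_pos hj, pv_getD_rev s i0 hj, if_pos hmm]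
    show (if s.eraseIdx i0 = s.reverse.eraseIdx (s.length - i0 - 1) then some ((i0 : Int))
          else some ((s.length : Int) - (i0 : Int) - 1)) = _
    split_ifs with hc <;> rfl
  | succ d ih =>
    intro i0 h1 h2
    rw [pvA_loop, dif_pos (by omega : i0 < s.length), pv_getD_rev s i0 (by omega),
      if_neg (by simpa using hpre i0 (by omega))]
    exact ih (i0 + 1) (by omega) (by omega)

theorem pv_rev_erase (s : List Char) (j : Nat) (hj : j < s.length) :
    s.reverse.eraseIdx (s.length - j - 1) = (s.eraseIdx j).reverse := by
  rw [List.eraseIdx_eq_take_drop_succ, List.eraseIdx_eq_take_drop_succ,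
    List.take_reverse, List.drop_reverse, List.reverse_append,
    show s.length - (s.length - j - 1) = j + 1 by omega,
    show s.length - (s.length - j - 1 + 1) = j by omega]

theorem pv_prefix_rev (s : List Char) (j : Nat) (hj : j + j < s.length - 1)
    (hpre : ∀ i, i < j → s.getD i ' ' = s.getD (s.length - 1 - i) ' ') :
    (s.drop (s.length - j)).reverse = s.take j := by
  refine List.ext_getElem (by simp; omega) ?_
  intro i h1 h2
  have hi : i < j := by simp only [List.length_take] at h2; omega
  rw [List.getElem_reverse]
  simp only [List.getElem_drop, List.getElem_take, List.length_drop]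
  have := hpre i hi
  rw [List.getD_eq_getElem _ _ (by omega), List.getD_eq_getElem _ _ (by omega)] at this
  rw [this]
  exact pv_getElem_idx s _ _ (by omega) (by omega) (by omega)

-- A's delete-and-compare verdict ↔ the inner block s[j+1 .. n-1-j] is a palindrome
theorem pv_bridge (s : List Char) (j : Nat) (hj : j + j < s.length - 1)
    (hpre : ∀ i, i < j → s.getD i ' ' = s.getD (s.length - 1 - i) ' ') :
    (s.eraseIdx j = s.reverse.eraseIdx (s.length - j - 1)) ↔
      ((s.drop (j + 1)).take (s.length - 1 - j - j) =
       ((s.drop (j + 1)).take (s.length - 1 - j - j)).reverse) := by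
  have hjn : j < s.length := by omega
  rw [pv_rev_erase s j hjn]
  have hba : (s.drop (s.length - j)).reverse = s.take j := pv_prefix_rev s j hj hpre
  have hab : (s.take j).reverse = s.drop (s.length - j) := by
    rw [← hba, List.reverse_reverse]
  have hsplit : s.eraseIdx j =
      (s.take j ++ (s.drop (j + 1)).take (s.length - 1 - j - j)) ++ s.drop (s.length - j) := by
    rw [List.eraseIdx_eq_take_drop_succ, List.append_assoc]
    congr 1
    calc s.drop (j + 1)
        = (s.drop (j + 1)).take (s.length - 1 - j - j) ++
            (s.drop (j + 1)).drop (s.length - 1 - j - j) := (List.take_append_drop _ _).symm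
      _ = _ := by rw [List.drop_drop]; congr 2; omega
  rw [hsplit]
  constructor
  · intro h
    rw [List.reverse_append, List.reverse_append, hab, hba] at h
    have h1 : (s.take j ++ (s.drop (j + 1)).take (s.length - 1 - j - j)) ++ s.drop (s.length - j) =
        (s.take j ++ ((s.drop (j + 1)).take (s.length - 1 - j - j)).reverse) ++
          s.drop (s.length - j) := by
      rw [h, List.append_assoc]
    exact List.append_cancel_left (List.append_cancel_right h1)
  · intro h
    rw [List.reverse_append, List.reverse_append, hab, hba, ← h, ← List.append_assoc]

-- the inner block is a palindrome ↔ all of B's shifted pair checks hold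
theorem pv_inner_iff (s : List Char) (j : Nat) (_hj : j + j < s.length - 1) :
    ((s.drop (j + 1)).take (s.length - 1 - j - j) =
     ((s.drop (j + 1)).take (s.length - 1 - j - j)).reverse) ↔
      (∀ k, j ≤ k → 2 * k + 2 < s.length →
        s.getD (k + 1) ' ' = s.getD (s.length - 1 - k) ' ') := by
  set n := s.length with hn
  set L := n - 1 - j - j with hL
  set t := (s.drop (j + 1)).take L with ht
  have htl : t.length = L := by
    rw [ht, List.length_take, List.length_drop]; omega
  have hget : ∀ m, m < L → t.getD m ' ' = s.getD (j + 1 + m) ' ' := by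
    intro m hm
    rw [List.getD_eq_getElem _ _ (by omega), List.getD_eq_getElem _ _ (by omega)]
    simp only [ht, List.getElem_take, List.getElem_drop]
  rw [pv_pal_iff t, htl]
  constructor
  · intro h k hjk hk
    have hm : k - j < L := by omega
    have := h (k - j) hm
    rw [hget _ hm, hget _ (by omega)] at this
    rw [show j + 1 + (k - j) = k + 1 by omega] at this
    rw [this]
    exact congrArg (fun x => s.getD x ' ') (by omega)
  · intro h m hm
    rw [hget _ hm, hget _ (by omega)]
    rcases Nat.lt_or_ge (2 * m + 1) L with hlt | hge
    · have := h (j + m) (by omega) (by omega)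
      rw [show j + m + 1 = j + 1 + m by omega] at this
      rw [this]
      exact congrArg (fun x => s.getD x ' ') (by omega)
    · rcases Nat.lt_or_ge (2 * m) (L - 1) with h2 | h2
      · omega
      · rcases Nat.eq_or_lt_of_le h2 with heq | hgt
        · exact congrArg (fun x => s.getD x ' ') (by omega)
        · have := h (j + (L - 1 - m)) (by omega) (by omega)
          rw [show j + (L - 1 - m) + 1 = j + 1 + (L - 1 - m) by omega] at this
          rw [show j + 1 + m = n - 1 - (j + (L - 1 - m)) by omega,
              show j + 1 + (L - 1 - m) = j + 1 + (L - 1 - m) from rfl]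
          exact this.symm

theorem calc_pal_main (s : List Char) :
    calc_pal (String.ofList s) = calc_pal_alt (String.ofList s) := by
  have hts : (String.ofList s).toList = s := String.toList_ofList
  set n := s.length with hn
  by_cases hpal : s = s.reverse
  · have hB : n ≤ 2 * (pvB_find s n 0) + 1 :=
      pv_find_conv s n rfl ((pv_pal_iff s).1 hpal) n 0 (by omega)
    simp only [calc_pal, calc_pal_alt, hts]
    rw [if_pos hpal, if_pos hB]
  · have hex : ∃ i, i < n ∧ ¬ s.getD i ' ' = s.getD (n - 1 - i) ' ' := by
      by_contra hc
      push_neg at hc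
      exact hpal ((pv_pal_iff s).2 fun i hi => hc i hi)
    have hspec := Nat.find_spec hex
    have hmin : ∀ i, i < Nat.find hex → ¬ (i < n ∧ ¬ s.getD i ' ' = s.getD (n - 1 - i) ' ') :=
      fun i hi => Nat.find_min hex hi
    generalize hjdef : Nat.find hex = j at hspec hmin
    obtain ⟨hjn, hmm⟩ := hspec
    have hpre : ∀ i, i < j → s.getD i ' ' = s.getD (n - 1 - i) ' ' := by
      intro i hi
      by_contra hne
      exact hmin i hi ⟨by omega, hne⟩
    have hjj : j + j < n - 1 := by
      by_contra hge
      push_neg at hge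
      rcases (by omega : n - 1 - j < j ∨ n - 1 - j = j) with hk | hk
      · have := hpre _ hk
        rw [show n - 1 - (n - 1 - j) = j by omega] at this
        exact hmm this.symm
      · rw [hk] at hmm
        exact hmm rfl
    have hA : calc_pal (String.ofList s) =
        (if s.eraseIdx j = s.reverse.eraseIdx (n - j - 1) then (j : Int)
         else (n : Int) - (j : Int) - 1) := by
      simp only [calc_pal, hts]
      rw [if_neg hpal, pv_aloop s j hjn hmm hpre j 0 (by omega) (by omega)]
      rfl
    have hfind : pvB_find s n 0 = j :=
      pv_find_stop s n j (by omega) hmm hpre j 0 (by omega) (by omega)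
    have hiff := (pv_bridge s j hjj hpre).trans (pv_inner_iff s j hjj)
    rw [hA]
    simp only [calc_pal_alt, hts, ← hn, hfind]
    rw [if_neg (by omega : ¬ n ≤ 2 * j + 1)]
    by_cases h : s.eraseIdx j = s.reverse.eraseIdx (n - j - 1)
    · rw [if_pos h]
      have hver : n ≤ 2 * (pvB_ver s n j) + 2 :=
        pv_ver_conv s n j (hiff.mp h) (n - j) j rfl (by omega)
      rw [if_pos hver]
    · rw [if_neg h]
      have hnot : ¬ ∀ k, j ≤ k → 2 * k + 2 < n →
          s.getD (k + 1) ' ' = s.getD (n - 1 - k) ' ' := fun hh => h (hiff.mpr hh)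
      have hex2 : ∃ k, (j ≤ k ∧ 2 * k + 2 < n) ∧ ¬ s.getD (k + 1) ' ' = s.getD (n - 1 - k) ' ' := by
        by_contra hc
        push_neg at hc
        exact hnot fun k h1 h2 => hc k ⟨h1, h2⟩
      have hspec2 := Nat.find_spec hex2
      have hmin2 : ∀ i, i < Nat.find hex2 →
          ¬ ((j ≤ i ∧ 2 * i + 2 < n) ∧ ¬ s.getD (i + 1) ' ' = s.getD (n - 1 - i) ' ') :=
        fun i hi => Nat.find_min hex2 hi
      generalize hk0def : Nat.find hex2 = k0 at hspec2 hmin2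
      obtain ⟨⟨hk0j, hk0n⟩, hk0mm⟩ := hspec2
      have hk0pre : ∀ i, j ≤ i → i < k0 → 2 * i + 2 < n →
          s.getD (i + 1) ' ' = s.getD (n - 1 - i) ' ' := by
        intro i hij hi h2
        by_contra hne
        exact hmin2 i hi ⟨⟨hij, h2⟩, hne⟩
      have hver : pvB_ver s n j = k0 :=
        pv_ver_stop s n j k0 hk0n hk0mm hk0pre (k0 - j) j rfl (by omega) hk0j
      rw [hver, if_neg (by omega : ¬ n ≤ 2 * k0 + 2)]
      omega

-- ===== VERDICT (by name: the statement is the Claim_ definition above) =====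
theorem calc_pal_spec : Claim_equal_calc_pal := by
  intro line _
  show calc_pal line = calc_pal_alt line
  have h : String.ofList line.toList = line := String.ofList_toList
  rw [← h]
  exact calc_pal_main line.toList
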